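-- pv_equiv track=rewrite | github.com/v2-io/agentic-systems | bin/lint-md.py | fix_math_spacing
-- ===== SOURCE A (Python) =====
-- def fix_math_spacing(line):
--     """Remove spaces after opening $ and before closing $ in inline math."""
--     result = []
--     i = 0
--     while i < len(line):
--         if line[i] == '`':
--             end = line.find('`', i + 1)
--             if end == -1:
--                 result.append(line[i:])
--                 break
--             result.append(line[i:end + 1])
--             i = end + 1
--             continue
--         if line[i] == '$':
--             if i + 1 < len(line) and line[i + 1] == '$':
--                 result.append('$$')
--                 i += 2
--                 continue
--             end = line.find('$', i + 1)
--             if end == -1: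
--                 result.append(line[i:])
--                 break
--             content = line[i + 1:end]
--             fixed = '$' + content.strip() + '$'
--             result.append(fixed)
--             i = end + 1
--             continue
--         result.append(line[i])
--         i += 1
--     return ''.join(result)
-- ===== SOURCE B (Python) =====
-- def fix_math_spacing(line):
--     """Remove spaces after opening $ and before closing $ in inline math."""
--     out = []
--     rest = line
--     while rest:
--         c = rest[0]
--         if c == '`':
--             body, tick, rest = rest[1:].partition('`')
--             out.append('`' + body + tick)      # tick == '' -> unterminated span swallows the rest
--         elif c == '$' and rest[1:2] == '$':
--             out.append('$$')
--             rest = rest[2:]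
--         elif c == '$':
--             body, dollar, tail = rest[1:].partition('$')
--             if dollar:
--                 out.append('$' + body.strip() + '$')
--                 rest = tail
--             else:
--                 out.append(c)                  # no closing '$' anywhere ahead: pass through
--                 rest = rest[1:]
--         else:
--             out.append(c)
--             rest = rest[1:]
--     return ''.join(out)
-- ===== Notes on version B (the rewrite author's own statement) =====
-- stated objective: alternative
-- what changed: A scans with an integer cursor, line.find calls and an append-rest-and-break for unmatched delimiters; B repeatedly rewrites the remaining suffix with str.partition (regex-engine style: try code-span, $$, $...$ at the front, else pass one char through), with no index arithmetic and no break.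
import Mathlib
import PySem

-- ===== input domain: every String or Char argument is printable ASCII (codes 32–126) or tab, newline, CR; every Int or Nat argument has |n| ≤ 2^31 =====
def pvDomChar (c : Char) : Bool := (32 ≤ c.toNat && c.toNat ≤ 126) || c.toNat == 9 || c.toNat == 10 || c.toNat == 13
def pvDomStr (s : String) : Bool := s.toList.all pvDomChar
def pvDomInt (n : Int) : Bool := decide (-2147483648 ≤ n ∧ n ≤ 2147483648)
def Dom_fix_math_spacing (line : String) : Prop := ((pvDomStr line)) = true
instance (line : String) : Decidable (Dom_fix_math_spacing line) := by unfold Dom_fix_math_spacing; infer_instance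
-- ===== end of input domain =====

-- B replaces A's index-and-find loop (with its break semantics) by a suffix rewriting loop built on
-- str.partition, the way a regex-alternation scanner consumes the line; objective: alternative/idiomatic.


-- ===== PORT A =====
-- A's `while i < len(line)` loop, step for step, as recursion on the index i;
-- `result` is the list of appended pieces, `''.join(result)` is its flatten.
def fixALoop (s : List Char) (i : Nat) (result : List (List Char)) : List (List Char) :=
  if h : i < s.length then
    if s[i] = '`' then
      -- end = line.find('`', i + 1)
      let e := PySem.Chars.findFrom s ['`'] ((i + 1 : Nat) : Int) none
      if he : e = -1 then
        result ++ [PySem.List.slice s (some ((i : Nat) : Int)) none]      -- result.append(line[i:]); break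
      else
        fixALoop s (e.toNat + 1) (result ++ [PySem.List.slice s (some ((i : Nat) : Int)) (some (e + 1))])
    else if s[i] = '$' then
      -- `i + 1 < len(line) and line[i + 1] == '$'` is exactly s[i+1]? = some '$'
      if s[i+1]? = some '$' then
        fixALoop s (i + 2) (result ++ [['$', '$']])
      else
        let e := PySem.Chars.findFrom s ['$'] ((i + 1 : Nat) : Int) none
        if he : e = -1 then
          result ++ [PySem.List.slice s (some ((i : Nat) : Int)) none]    -- result.append(line[i:]); break
        else
          let content := PySem.List.slice s (some ((i + 1 : Nat) : Int)) (some e)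
          let fixed := '$' :: (PySem.Chars.strip content ++ ['$'])
          fixALoop s (e.toNat + 1) (result ++ [fixed])
    else
      fixALoop s (i + 1) (result ++ [[s[i]]])
  else result
termination_by s.length - i
decreasing_by
  · have hs := (PySem.Chars.findFrom_natCast_spec s ['`'] (i + 1) (by omega) he).1
    omega
  · omega
  · have hs := (PySem.Chars.findFrom_natCast_spec s ['$'] (i + 1) (by omega) he).1
    omega
  · omega

def fix_math_spacing (line : String) : String :=
  String.ofList (fixALoop line.toList 0 []).flatten

-- ===== PORT B =====
-- B's `while rest:` loop over the remaining suffix; str.partition(sep) for the one-character sep is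
-- ported by hand, exactly: body = longest sep-free prefix, then sep present (tail follows) or absent.
def fixBLoop (rest : List Char) : List Char :=
  match rest with
  | [] => []
  | c :: tl =>
    if c = '`' then
      -- body, tick, rest = rest[1:].partition('`'):
      -- body = longest '`'-free prefix of tl, the rest of tl decides tick ('' vs '`') and the tail
      match _hm : tl.dropWhile (· != '`') with
      | [] => '`' :: tl.takeWhile (· != '`')                               -- tick == '': unterminated
      | _ :: rest' => '`' :: (tl.takeWhile (· != '`') ++ '`' :: fixBLoop rest')
    else if c = '$' ∧ tl.take 1 = ['$'] then                               -- rest[1:2] == '$'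
      '$' :: '$' :: fixBLoop (tl.drop 1)
    else if c = '$' then
      -- body, dollar, tail = rest[1:].partition('$')
      match _hm : tl.dropWhile (· != '$') with
      | [] => c :: fixBLoop tl                                             -- no closing '$': pass through
      | _ :: tail => '$' :: (PySem.Chars.strip (tl.takeWhile (· != '$')) ++ '$' :: fixBLoop tail)
    else c :: fixBLoop tl
termination_by rest.length
decreasing_by
  all_goals first
  | (have h2 := (List.dropWhile_sublist (l := tl) (fun x => x != '`')).length_le
     rw [_hm] at h2; simp at h2 ⊢; omega)
  | (have h2 := (List.dropWhile_sublist (l := tl) (fun x => x != '$')).length_le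
     rw [_hm] at h2; simp at h2 ⊢; omega)
  | simp

def fix_math_spacing_alt (line : String) : String :=
  String.ofList (fixBLoop line.toList)

-- ===== PRECONDITION & SPEC =====
def Spec_fix_math_spacing (line : String) (out : String) : Prop := out = fix_math_spacing_alt line
instance (line : String) (out : String) : Decidable (Spec_fix_math_spacing line out) := by unfold Spec_fix_math_spacing; infer_instance

-- ===== CLAIM (what is proved, stated in full; the proofs are below) =====
def Claim_equal_fix_math_spacing : Prop := ∀ (line : String), Dom_fix_math_spacing line → Spec_fix_math_spacing line (fix_math_spacing line)

-- ===== LEMMAS AND PROOFS =====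

lemma drop_takeWhile_length (p : Char → Bool) (l : List Char) :
    l.drop (l.takeWhile p).length = l.dropWhile p := by
  conv_lhs => rw [show l.drop (l.takeWhile p).length
      = (l.takeWhile p ++ l.dropWhile p).drop (l.takeWhile p).length from by
    rw [List.takeWhile_append_dropWhile]]
  rw [List.drop_left]

-- if c occurs in l, l splits as (sep-free prefix) ++ c :: rest
lemma split_at_first (l : List Char) (c : Char) (hc : c ∈ l) :
    l = l.takeWhile (· != c) ++ c :: l.drop ((l.takeWhile (· != c)).length + 1) := by
  have hne : l.dropWhile (· != c) ≠ [] := by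
    intro h
    rw [List.dropWhile_eq_nil_iff] at h
    simpa using h c hc
  obtain ⟨x, xs, hx⟩ := List.exists_cons_of_ne_nil hne
  have hxc : x = c := by
    have := List.head_dropWhile_not (· != c) hne
    simp [hx] at this
    exact this
  have hxs : l.drop ((l.takeWhile (· != c)).length + 1) = xs := by
    rw [← List.drop_drop, drop_takeWhile_length, hx, List.drop_one, List.tail_cons]
  rw [hxs]
  conv_lhs => rw [← List.takeWhile_append_dropWhile (p := (· != c)) (l := l)]
  rw [hx, hxc]

lemma singleton_prefix_iff (x : List Char) (c : Char) : [c] <+: x ↔ ∃ t, x = c :: t := by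
  constructor
  · rintro ⟨t, rfl⟩; exact ⟨t, rfl⟩
  · rintro ⟨t, rfl⟩; exact ⟨t, rfl⟩

-- Python's find of a single character: first occurrence = length of the sep-free prefix
lemma find_singleton (l : List Char) (c : Char) :
    PySem.Chars.find l [c] = if c ∈ l then (((l.takeWhile (· != c)).length : Nat) : Int) else -1 := by
  by_cases hc : c ∈ l
  · simp only [hc, if_true]
    have hinf : [c] <:+: l := (List.singleton_infix_iff c l).mpr hc
    have h0 : 0 ≤ PySem.Chars.find l [c] := (PySem.Chars.find_nonneg_iff l [c]).mpr hinf
    obtain ⟨hpre, hmin⟩ := PySem.Chars.find_spec (s := l) (sub := [c]) h0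
    set j := (PySem.Chars.find l [c]).toNat with hj
    set B := l.takeWhile (· != c) with hB
    have hsplit := split_at_first l c hc
    -- j ≤ B.length : else minimality contradicted at B.length
    have h1 : j ≤ B.length := by
      by_contra hgt
      push Not at hgt
      have : ¬ [c] <+: l.drop B.length := hmin B.length hgt
      apply this
      rw [show l.drop B.length = c :: l.drop (B.length + 1) from by
        conv_lhs => rw [hsplit]
        rw [hB, List.drop_left]]
      exact ⟨_, rfl⟩
    -- B.length ≤ j
    have h2 : B.length ≤ j := by
      by_contra hgt
      push Not at hgt
      obtain ⟨t, ht⟩ := (singleton_prefix_iff _ _).mp hpre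
      -- l[j] = c but l[j] ∈ B
      have hjc : l[j]? = some c := by
        have := congrArg List.head? ht
        simpa [List.head?_drop] using this
      have hmem : c ∈ B := by
        have hjB : B[j]? = some c := by
          rw [hsplit, List.getElem?_append_left (by omega)] at hjc
          exact hjc
        exact List.mem_of_getElem? hjB
      have := List.mem_takeWhile_imp hmem
      simp at this
    have : j = B.length := le_antisymm h1 h2
    omega
  · simp only [hc, if_false]
    rw [PySem.Chars.find_eq_neg_one_iff]
    rw [List.singleton_infix_iff]
    exact hc

-- B leaves a line with no '$' unchanged (code spans are reproduced verbatim)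
lemma fixBLoop_no_dollar (l : List Char) (h : '$' ∉ l) : fixBLoop l = l := by
  induction l using fixBLoop.induct with
  | case1 => rw [fixBLoop]
  | case2 tl hm =>
    rw [fixBLoop, if_pos rfl]
    split
    · rw [List.dropWhile_eq_nil_iff] at hm
      congr 1
      rw [List.takeWhile_eq_self_iff]
      intro x hx; exact hm x hx
    · rename_i hd rst heq
      rw [hm] at heq; cases heq
  | case3 tl hd0 rest' hm ih =>
    rw [fixBLoop, if_pos rfl]
    split
    · rename_i heq; rw [hm] at heq; cases heq
    · rename_i hd rst heq
      rw [hm] at heq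
      injection heq with h1 h2
      subst h1; subst h2
      have hhead : hd0 = '`' := by
        have hne : tl.dropWhile (· != '`') ≠ [] := by rw [hm]; simp
        have := List.head_dropWhile_not (· != '`') hne
        simp [hm] at this; exact this
      have htl : tl = tl.takeWhile (· != '`') ++ hd0 :: rest' := by
        conv_lhs => rw [← List.takeWhile_append_dropWhile (p := (· != '`')) (l := tl)]
        rw [hm]
      have hrest : '$' ∉ rest' := by
        intro hx
        have hmem : '$' ∈ tl := by
          rw [htl]; exact List.mem_append_right _ (List.mem_cons_of_mem _ hx)
        exact h (List.mem_cons_of_mem _ hmem)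
      rw [ih hrest]
      conv_rhs => rw [htl, hhead]
  | case4 c tl hne hcond ih =>
    exfalso; exact h (by rw [hcond.1]; exact List.mem_cons_self ..)
  | case5 tl hm hne hcond ih =>
    exfalso; exact h (List.mem_cons_self ..)
  | case6 tl hd0 rest' hm hne hcond ih =>
    exfalso; exact h (List.mem_cons_self ..)
  | case7 c tl hne1 hne2 hne3 ih =>
    rw [fixBLoop, if_neg hne1, if_neg hne2, if_neg hne3]
    rw [ih (fun hx => h (List.mem_cons_of_mem _ hx))]

-- l[:1] == [c] iff the head is c
lemma take_one_eq_singleton (l : List Char) (c : Char) :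
    l.take 1 = [c] ↔ l.head? = some c := by
  cases l <;> simp

-- the main loop invariant: at index i, A's remaining output is B's rewriting of the suffix
lemma fixALoop_eq (s : List Char) (n i : Nat) (acc : List (List Char))
    (hn : s.length - i ≤ n) (hi : i ≤ s.length) :
    (fixALoop s i acc).flatten = acc.flatten ++ fixBLoop (s.drop i) := by
  induction n generalizing i acc with
  | zero =>
    have hieq : i = s.length := by omega
    rw [fixALoop, dif_neg (by omega)]
    subst hieq
    simp [fixBLoop]
  | succ n IH =>
    by_cases h : i < s.length
    · have hdrop : s.drop i = s[i] :: s.drop (i + 1) := List.drop_eq_getElem_cons h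
      rw [fixALoop, dif_pos h]
      by_cases hbt : s[i] = '`'
      · rw [if_pos hbt]
        rw [PySem.Chars.findFrom_natCast s ['`'] (i + 1) (by omega)]
        rw [find_singleton (s.drop (i + 1)) '`']
        by_cases hc : '`' ∈ s.drop (i + 1)
        · set B := (s.drop (i + 1)).takeWhile (· != '`') with hB
          set R := (s.drop (i + 1)).drop (B.length + 1) with hR
          have hsplit : s.drop (i + 1) = B ++ '`' :: R := split_at_first _ _ hc
          have hlen : s.length - (i + 1) = B.length + 1 + R.length := by
            have := congrArg List.length hsplit
            simp at this; omega
          rw [if_pos hc]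
          rw [if_neg (show ¬(((B.length : Nat) : Int) = -1) from by omega)]
          have hne : ¬((((i + 1 : Nat) : Int) + ((B.length : Nat) : Int)) = -1) := by omega
          simp only [dif_neg hne]
          have he1 : ((i + 1 : Nat) : Int) + ((B.length : Nat) : Int) + 1 = ((i + B.length + 2 : Nat) : Int) := by
            push_cast; ring
          have he2 : (((i + 1 : Nat) : Int) + ((B.length : Nat) : Int)).toNat + 1 = i + B.length + 2 := by
            omega
          rw [he1, he2, PySem.List.slice_natCast]
          rw [IH (i + B.length + 2) _ (by omega) (by omega)]
          have hpiece : (s.drop i).take (i + B.length + 2 - i) = '`' :: (B ++ ['`']) := by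
            rw [show i + B.length + 2 - i = (B.length + 1) + 1 from by omega]
            rw [hdrop, hbt, hsplit, List.take_succ_cons]
            rw [show B.length + 1 = B.length + 1 from rfl, List.take_length_add_append]
            simp
          have hdropR : s.drop (i + B.length + 2) = R := by
            rw [show i + B.length + 2 = (i + 1) + (B.length + 1) from by omega, ← List.drop_drop]
          rw [hpiece, hdropR]
          -- right-hand side: B's backtick branch
          conv_rhs => rw [hdrop, hbt, fixBLoop]
          rw [if_pos rfl]
          have hdw : (s.drop (i + 1)).dropWhile (· != '`') = '`' :: R := by
            rw [← drop_takeWhile_length, ← hB, hsplit, List.drop_left]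
          split
          · rename_i heq; rw [hdw] at heq; cases heq
          · rename_i hd rst heq
            rw [hdw] at heq
            injection heq with h1 h2
            subst h1; subst h2
            simp [← hB]
        · rw [if_neg hc]
          simp only [reduceIte, reduceDIte]
          rw [PySem.List.slice_from_natCast]
          have hdw : (s.drop (i + 1)).dropWhile (· != '`') = [] := by
            rw [List.dropWhile_eq_nil_iff]
            intro x hx; simp; intro hxx; exact hc (hxx ▸ hx)
          have htw : (s.drop (i + 1)).takeWhile (· != '`') = s.drop (i + 1) := by
            rw [List.takeWhile_eq_self_iff]
            intro x hx; simp; intro hxx; exact hc (hxx ▸ hx)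
          conv_rhs => rw [hdrop, hbt, fixBLoop]
          rw [if_pos rfl]
          split
          · rw [htw, hdrop, hbt]; simp
          · rename_i hd rst heq; rw [hdw] at heq; cases heq
      · rw [if_neg hbt]
        by_cases hdl : s[i] = '$'
        · rw [if_pos hdl]
          by_cases hnext : s[i+1]? = some '$'
          · rw [if_pos hnext]
            obtain ⟨hlt, hval⟩ := List.getElem?_eq_some_iff.mp hnext
            rw [IH (i + 2) _ (by omega) (by omega)]
            conv_rhs => rw [hdrop, hdl, fixBLoop]
            rw [if_neg (by decide)]
            rw [if_pos (show '$' = '$' ∧ (s.drop (i+1)).take 1 = ['$'] by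
              refine ⟨rfl, ?_⟩
              rw [take_one_eq_singleton, List.head?_drop]
              exact hnext)]
            rw [show (s.drop (i+1)).drop 1 = s.drop (i + 2) from by
              rw [List.drop_drop]]
            simp
          · rw [if_neg hnext]
            rw [PySem.Chars.findFrom_natCast s ['$'] (i + 1) (by omega)]
            rw [find_singleton (s.drop (i + 1)) '$']
            have hB2 : ¬('$' = '$' ∧ (s.drop (i+1)).take 1 = ['$']) := by
              rintro ⟨-, ht⟩
              rw [take_one_eq_singleton, List.head?_drop] at ht
              exact hnext ht
            by_cases hc : '$' ∈ s.drop (i + 1)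
            · set B := (s.drop (i + 1)).takeWhile (· != '$') with hB
              set R := (s.drop (i + 1)).drop (B.length + 1) with hR
              have hsplit : s.drop (i + 1) = B ++ '$' :: R := split_at_first _ _ hc
              have hlen : s.length - (i + 1) = B.length + 1 + R.length := by
                have := congrArg List.length hsplit
                simp at this; omega
              rw [if_pos hc]
              rw [if_neg (show ¬(((B.length : Nat) : Int) = -1) from by omega)]
              have hne : ¬((((i + 1 : Nat) : Int) + ((B.length : Nat) : Int)) = -1) := by omega
              simp only [dif_neg hne]
              have he1 : ((i + 1 : Nat) : Int) + ((B.length : Nat) : Int) = ((i + 1 + B.length : Nat) : Int) := by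
                push_cast; ring
              have he2 : (((i + 1 : Nat) : Int) + ((B.length : Nat) : Int)).toNat + 1 = i + B.length + 2 := by
                omega
              rw [he2]
              conv_lhs => rw [he1]
              rw [PySem.List.slice_natCast]
              rw [IH (i + B.length + 2) _ (by omega) (by omega)]
              have hcontent : (s.drop (i + 1)).take (i + 1 + B.length - (i + 1)) = B := by
                rw [show i + 1 + B.length - (i + 1) = B.length + 0 from by omega]
                rw [hsplit, List.take_length_add_append]
                simp
              have hdropR : s.drop (i + B.length + 2) = R := by
                rw [show i + B.length + 2 = (i + 1) + (B.length + 1) from by omega, ← List.drop_drop]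
              rw [hcontent, hdropR]
              conv_rhs => rw [hdrop, hdl, fixBLoop]
              rw [if_neg (by decide), if_neg hB2, if_pos rfl]
              have hdw : (s.drop (i + 1)).dropWhile (· != '$') = '$' :: R := by
                rw [← drop_takeWhile_length, ← hB, hsplit, List.drop_left]
              split
              · rename_i heq; rw [hdw] at heq; cases heq
              · rename_i hd rst heq
                rw [hdw] at heq
                injection heq with h1 h2
                subst h1; subst h2
                simp [← hB]
            · rw [if_neg hc]
              simp only [reduceIte, reduceDIte]
              rw [PySem.List.slice_from_natCast]
              have hdw : (s.drop (i + 1)).dropWhile (· != '$') = [] := by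
                rw [List.dropWhile_eq_nil_iff]
                intro x hx; simp; intro hxx; exact hc (hxx ▸ hx)
              conv_rhs => rw [hdrop, hdl, fixBLoop]
              rw [if_neg (by decide), if_neg hB2, if_pos rfl]
              split
              · rw [fixBLoop_no_dollar _ hc, hdrop, hdl]; simp
              · rename_i hd rst heq; rw [hdw] at heq; cases heq
        · rw [if_neg hdl]
          rw [IH (i + 1) _ (by omega) (by omega)]
          conv_rhs => rw [hdrop, fixBLoop]
          rw [if_neg hbt, if_neg (by rintro ⟨hx, -⟩; exact hdl hx), if_neg hdl]
          simp
    · have hieq : i = s.length := by omega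
      rw [fixALoop, dif_neg h]
      subst hieq
      simp [fixBLoop]

-- ===== VERDICT (by name: the statement is the Claim_ definition above) =====
theorem fix_math_spacing_spec : Claim_equal_fix_math_spacing := by
  intro line _
  unfold Spec_fix_math_spacing fix_math_spacing fix_math_spacing_alt
  rw [fixALoop_eq line.toList line.toList.length 0 [] (by omega) (by omega)]
  simp
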